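-- pv_equiv track=rewrite | github.com/antipovaya/PythonProject2 | sem1/task05.py | even_elements
-- ===== SOURCE A (Python) =====
-- def even_elements(n, e):
--     num = 0
--     total = 0
--     while num <= n:
--         num += 1
--         if num % 2 == 0:
--             if num % e == 0:
--                 continue
--             total += num
--
--     return total
-- ===== SOURCE B (Python) =====
-- def even_elements(n, e):
--     # Closed form: sum of evens in [1, n+1] minus sum of multiples of lcm(2, |e|) in [1, n+1].
--     if n < 0:
--         return 0
--     m = n + 1
--     k = m // 2
--     total = k * (k + 1)
--     if e != 0:
--         h = abs(e) if e % 2 else abs(e) // 2   # lcm(2, |e|) == 2*h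
--         t = m // (2 * h)
--         total -= h * t * (t + 1)
--     return total
-- ===== Notes on version B (the rewrite author's own statement) =====
-- stated objective: faster
-- what changed: Replaced A's O(n) increment-and-test loop by an O(1) closed form: sum of the even arithmetic series up to n+1 minus the series of multiples of lcm(2,|e|).
import Mathlib
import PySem

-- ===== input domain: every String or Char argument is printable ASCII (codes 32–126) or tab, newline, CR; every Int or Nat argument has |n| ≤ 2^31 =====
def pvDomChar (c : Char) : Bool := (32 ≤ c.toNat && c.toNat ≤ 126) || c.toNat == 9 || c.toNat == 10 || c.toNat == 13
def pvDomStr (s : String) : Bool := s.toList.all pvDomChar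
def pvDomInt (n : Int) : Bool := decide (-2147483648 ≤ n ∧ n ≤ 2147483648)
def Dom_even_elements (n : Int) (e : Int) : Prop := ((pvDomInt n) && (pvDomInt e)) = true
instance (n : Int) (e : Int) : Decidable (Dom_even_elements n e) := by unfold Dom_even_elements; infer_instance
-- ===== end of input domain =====

-- B is the O(1) closed form (two arithmetic series) of A's O(n) loop.

-- ===== PORT A =====
-- the while loop of A, step for step (fuel = number of remaining iterations, (n + 1 - num).toNat):
-- num += 1; if num % 2 == 0: (if num % e == 0: continue); total += num
def evenLoopA (e : Int) : Nat → Int → Int → Int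
  | 0, _, total => total
  | f + 1, num, total =>
    if PySem.Int.mod (num + 1) 2 = 0 then
      if PySem.Int.mod (num + 1) e = 0 then
        evenLoopA e f (num + 1) total
      else
        evenLoopA e f (num + 1) (total + (num + 1))
    else
      evenLoopA e f (num + 1) total

def even_elements (n : Int) (e : Int) : Int :=
  evenLoopA e (n + 1).toNat 0 0

-- ===== PORT B =====
def even_elements_alt (n : Int) (e : Int) : Int :=
  if n < 0 then 0
  else
    let m := n + 1
    let k := PySem.Int.floordiv m 2
    let total := k * (k + 1)
    if e ≠ 0 then
      let h := if PySem.Int.mod e 2 ≠ 0 then |e| else PySem.Int.floordiv |e| 2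
      let t := PySem.Int.floordiv m (2 * h)
      total - h * t * (t + 1)
    else total

-- ===== PRECONDITION & SPEC =====
-- Pre_ excludes exactly the inputs where A raises ZeroDivisionError: e = 0 with n ≥ 1.
def Pre_even_elements (n : Int) (e : Int) : Prop := e ≠ 0 ∨ n ≤ 0
instance (n : Int) (e : Int) : Decidable (Pre_even_elements n e) := by unfold Pre_even_elements; infer_instance
def pvWitness_even_elements : Int × Int := (10, 3)

def Spec_even_elements (n : Int) (e : Int) (out : Int) : Prop := out = even_elements_alt n e
instance (n : Int) (e : Int) (out : Int) : Decidable (Spec_even_elements n e out) := by unfold Spec_even_elements; infer_instance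

-- ===== CLAIM (what is proved, stated in full; the proofs are below) =====
def Claim_equal_even_elements : Prop := ∀ (n : Int) (e : Int), Dom_even_elements n e → Pre_even_elements n e → Spec_even_elements n e (even_elements n e)

-- ===== LEMMAS AND PROOFS =====

-- the sum A accumulates, as a function of the upper bound m = n+1, counting i = 1..m
def F (e : Int) : Nat → Int
  | 0 => 0
  | m + 1 =>
      let i : Int := (m : Int) + 1
      F e m + (if PySem.Int.mod i 2 = 0 ∧ ¬ PySem.Int.mod i e = 0 then i else 0)

theorem loopA_eq_F (e : Int) : ∀ (f : Nat) (num total : Int), 0 ≤ num →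
    evenLoopA e f num total = total + F e (num.toNat + f) - F e num.toNat := by
  intro f
  induction f with
  | zero =>
    intro num total h0
    simp [evenLoopA]
  | succ f ih =>
    intro num total h0
    have hstep : (num + 1).toNat = num.toNat + 1 := by omega
    have hcast : ((num.toNat : Int)) = num := by omega
    have hF : F e (num.toNat + 1) = F e num.toNat +
        (if PySem.Int.mod (num + 1) 2 = 0 ∧ ¬ PySem.Int.mod (num + 1) e = 0 then num + 1 else 0) := by
      show F e num.toNat + _ = _
      rw [hcast]
    have hrec : ∀ t : Int, evenLoopA e f (num + 1) t = t + F e (num.toNat + 1 + f) - F e (num.toNat + 1) := by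
      intro t
      have := ih (num + 1) t (by omega)
      rwa [hstep] at this
    rw [evenLoopA]
    by_cases h2 : PySem.Int.mod (num + 1) 2 = 0
    · by_cases he : PySem.Int.mod (num + 1) e = 0
      · rw [if_pos h2, if_pos he, hrec,
          show num.toNat + (f + 1) = num.toNat + 1 + f from by omega, hF,
          if_neg (by tauto)]
        ring
      · rw [if_pos h2, if_neg he, hrec,
          show num.toNat + (f + 1) = num.toNat + 1 + f from by omega, hF,
          if_pos ⟨h2, he⟩]
        ring
    · rw [if_neg h2, hrec,
        show num.toNat + (f + 1) = num.toNat + 1 + f from by omega, hF,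
        if_neg (by tauto)]
      ring

-- divisibility form of the loop condition, for e ≠ 0, via the half-lcm h
theorem cond_iff (e i : Int) (h : Int)
    (hh : h = (if PySem.Int.mod e 2 ≠ 0 then |e| else PySem.Int.floordiv |e| 2)) :
    (PySem.Int.mod i 2 = 0 ∧ ¬ PySem.Int.mod i e = 0) ↔ ((2 : Int) ∣ i ∧ ¬ (2 * h) ∣ i) := by
  rw [PySem.Int.mod_eq_zero_iff_dvd, PySem.Int.mod_eq_zero_iff_dvd]
  have hmod : (PySem.Int.mod e 2 ≠ 0) ↔ ¬ (2 : Int) ∣ e := by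
    rw [Ne, PySem.Int.mod_eq_zero_iff_dvd]
  by_cases h2e : (2 : Int) ∣ e
  · -- e even: 2h = |e|
    have h2h : 2 * h = |e| := by
      rw [hh, if_neg (by simp only [ne_eq, not_not, PySem.Int.mod_eq_zero_iff_dvd]; exact h2e)]
      rw [PySem.Int.floordiv_eq_ediv_of_pos (by omega : (0:Int) < 2)]
      exact Int.mul_ediv_cancel' ((dvd_abs 2 e).mpr h2e)
    rw [h2h, abs_dvd]
  · -- e odd: h = |e|, and for even i, e ∣ i ↔ 2|e| ∣ i
    have hha : h = |e| := by rw [hh, if_pos (hmod.mpr h2e)]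
    have habs : ∀ j : Int, (2 * |e|) ∣ j ↔ (2 * e) ∣ j := by
      intro j
      rcases abs_choice e with hc | hc <;> rw [hc]
      simp [neg_dvd, show (2 : Int) * -e = -(2 * e) from by ring]
    rw [hha]
    constructor
    · rintro ⟨h2, hne⟩
      refine ⟨h2, fun hd => hne ?_⟩
      exact (abs_dvd e i).mp (dvd_trans (dvd_mul_left |e| 2) hd)
    · rintro ⟨h2, hne⟩
      refine ⟨h2, fun hd => hne ?_⟩
      have hcop : IsCoprime (2 : Int) e := (Int.prime_two.coprime_iff_not_dvd).mpr h2e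
      exact (habs i).mpr (hcop.mul_dvd h2 hd)

-- closed form of F for e ≠ 0: with L = 2h = lcm(2,|e|) > 0,
-- F e m = k(k+1) - h·t(t+1) where k = m/2, t = m/L (Nat division)
theorem F_closed (e : Int) (h : Int)
    (hh : h = (if PySem.Int.mod e 2 ≠ 0 then |e| else PySem.Int.floordiv |e| 2))
    (hpos : 0 < h) :
    ∀ m : Nat, F e m = ((m / 2 : Nat) : Int) * ((m / 2 : Nat) + 1)
      - h * ((m / (2 * h).toNat : Nat) : Int) * (((m / (2 * h).toNat : Nat) : Int) + 1) := by
  intro m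
  set L : Nat := (2 * h).toNat with hL
  have hLpos : 0 < L := by omega
  have hLval : (L : Int) = 2 * h := by omega
  induction m with
  | zero => simp [F, Nat.zero_div]
  | succ m ih =>
    have hcond := cond_iff e ((m : Int) + 1) h hh
    rw [F]
    rw [ih]
    have hk : (m + 1) / 2 = m / 2 + if 2 ∣ (m + 1) then 1 else 0 := Nat.succ_div
    have ht : (m + 1) / L = m / L + if L ∣ (m + 1) then 1 else 0 := Nat.succ_div
    have hdvdL : ((2 * h : Int) ∣ ((m : Int) + 1)) ↔ L ∣ (m + 1) := by
      rw [← hLval]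
      constructor
      · intro hd; exact_mod_cast Int.ofNat_dvd.mp (by exact_mod_cast hd)
      · intro hd; exact_mod_cast Int.natCast_dvd_natCast.mpr hd
    by_cases hL1 : L ∣ (m + 1)
    · -- multiple of L: even, but excluded from the sum; both series advance by one term
      obtain ⟨c, hc⟩ := hL1
      rcases c with _ | c
      · omega
      have hmdiv : m / L = c := by
        have h1 : m = L * c + (L - 1) := by
          have : L * (c + 1) = L * c + L := by ring
          omega
        rw [h1, Nat.mul_add_div hLpos, Nat.div_eq_of_lt (by omega)]
        omega
      have h21 : 2 ∣ (m + 1) := dvd_trans (show 2 ∣ L by omega) ⟨c + 1, hc⟩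
      have hcnd : ¬ (PySem.Int.mod ((m:Int)+1) 2 = 0 ∧ ¬ PySem.Int.mod ((m:Int)+1) e = 0) := by
        rw [hcond]
        rintro ⟨-, hne⟩
        exact hne (hdvdL.mpr ⟨c + 1, hc⟩)
      rw [if_neg hcnd, hk, ht, if_pos h21, if_pos ⟨c + 1, hc⟩, hmdiv]
      have hm2 : ((m : Int) + 1) = 2 * ((m / 2 : Nat) + 1) := by omega
      have hmL : ((m : Int) + 1) = 2 * h * ((c : Int) + 1) := by
        have : ((m : Int) + 1) = (L : Int) * ((c : Int) + 1) := by exact_mod_cast congrArg (Nat.cast (R := Int)) hc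
        rw [this, hLval]
      simp only [Nat.cast_add, Nat.cast_one]
      linear_combination hm2 - hmL
    · by_cases h21 : 2 ∣ (m + 1)
      · -- even, not a multiple of L: contributes m+1; only the even series advances
        have hcnd : (PySem.Int.mod ((m:Int)+1) 2 = 0 ∧ ¬ PySem.Int.mod ((m:Int)+1) e = 0) := by
          rw [hcond]
          exact ⟨by exact_mod_cast Int.natCast_dvd_natCast.mpr h21, fun hd => hL1 (hdvdL.mp hd)⟩
        rw [if_pos hcnd, hk, ht, if_pos h21, if_neg hL1]
        have hm2 : ((m : Int) + 1) = 2 * ((m / 2 : Nat) + 1) := by omega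
        simp only [Nat.cast_add, Nat.cast_one]
        linear_combination hm2
      · -- odd: contributes nothing; neither series advances
        have hcnd : ¬ (PySem.Int.mod ((m:Int)+1) 2 = 0 ∧ ¬ PySem.Int.mod ((m:Int)+1) e = 0) := by
          rw [hcond]
          rintro ⟨hd, -⟩
          exact h21 (by exact_mod_cast Int.ofNat_dvd.mp (by exact_mod_cast hd))
        rw [if_neg hcnd, hk, ht, if_neg h21, if_neg hL1]
        norm_num

theorem hpos_of_ne (e : Int) (he : e ≠ 0) :
    0 < (if PySem.Int.mod e 2 ≠ 0 then |e| else PySem.Int.floordiv |e| 2) := by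
  by_cases hodd : PySem.Int.mod e 2 ≠ 0
  · rw [if_pos hodd]; exact abs_pos.mpr he
  · rw [if_neg hodd]
    rw [not_not, PySem.Int.mod_eq_zero_iff_dvd] at hodd
    rw [PySem.Int.floordiv_eq_ediv_of_pos (by omega : (0:Int) < 2)]
    have h2abs : (2 : Int) ∣ |e| := (dvd_abs 2 e).mpr hodd
    have := Int.mul_ediv_cancel' h2abs
    have habs : 0 < |e| := abs_pos.mpr he
    omega

-- ===== VERDICT (by name: the statement is the Claim_ definition above) =====
theorem even_elements_spec : Claim_equal_even_elements := by
  intro n e _ hpre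
  unfold Spec_even_elements even_elements
  by_cases hn : n < 0
  · rw [show (n + 1).toNat = 0 from by omega]
    unfold even_elements_alt
    rw [if_pos hn]
    rfl
  · have hn0 : 0 ≤ n := by omega
    by_cases he : e = 0
    · -- e = 0 forces n = 0 under Pre_; both sides are 0
      have hn00 : n = 0 := by
        rcases hpre with h | h
        · exact absurd he h
        · omega
      subst hn00; subst he
      decide
    · -- main case: loop = F, F = closed form, closed form = B's arithmetic
      set m : Nat := (n + 1).toNat with hm
      have hmc : ((m : Int)) = n + 1 := by omega
      have hA : evenLoopA e m 0 0 = F e m := by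
        have := loopA_eq_F e m 0 0 (le_refl 0)
        simpa [F] using this
      set h : Int := (if PySem.Int.mod e 2 ≠ 0 then |e| else PySem.Int.floordiv |e| 2) with hh
      have hpos : 0 < h := hpos_of_ne e he
      have halt : even_elements_alt n e =
          PySem.Int.floordiv (n + 1) 2 * (PySem.Int.floordiv (n + 1) 2 + 1)
            - h * PySem.Int.floordiv (n + 1) (2 * h) * (PySem.Int.floordiv (n + 1) (2 * h) + 1) := by
        simp only [even_elements_alt]
        rw [if_neg (by omega : ¬ n < 0), if_pos he, ← hh]
      have hk : PySem.Int.floordiv (n + 1) 2 = ((m / 2 : Nat) : Int) := by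
        rw [← hmc]
        exact_mod_cast PySem.Int.floordiv_natCast m 2
      have hLt : (2 * h) = (((2 * h).toNat : Nat) : Int) := by omega
      have ht : PySem.Int.floordiv (n + 1) (2 * h) = ((m / (2 * h).toNat : Nat) : Int) := by
        rw [← hmc, hLt]
        exact_mod_cast PySem.Int.floordiv_natCast m (2 * h).toNat
      rw [hA, F_closed e h hh hpos m, halt, hk, ht]
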